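-- pv_equiv track=rewrite | github.com/burlakovdp/bases_informatique_1 | TD/TD #4.py | recoder
-- ===== SOURCE A (Python) =====
-- def est_ascii(ch):
--     for i in range(len(ch)):
--         if ord(ch[i]) < 0 or ord(ch[i]) > 127:
--             return False
--     return True
--
-- def recoder(L):
--     res = ''
--     for i in range(len(L)):
--         if est_ascii(chr(L[i])) == True:
--             res += chr(L[i])
--         else:
--             res += '?'
--     return res
-- ===== SOURCE B (Python) =====
-- def recoder(L):
--     s = ''.join(chr(c) for c in L)
--     return s.encode('ascii', 'replace').decode('ascii')
-- ===== Notes on version B (the rewrite author's own statement) =====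
-- stated objective: idiomatic
-- what changed: Replaces the explicit per-character loop with its est_ascii helper by a join of chr(c) followed by the ASCII codec's 'replace' error handler, which substitutes '?' for every non-ASCII character.
import Mathlib
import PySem

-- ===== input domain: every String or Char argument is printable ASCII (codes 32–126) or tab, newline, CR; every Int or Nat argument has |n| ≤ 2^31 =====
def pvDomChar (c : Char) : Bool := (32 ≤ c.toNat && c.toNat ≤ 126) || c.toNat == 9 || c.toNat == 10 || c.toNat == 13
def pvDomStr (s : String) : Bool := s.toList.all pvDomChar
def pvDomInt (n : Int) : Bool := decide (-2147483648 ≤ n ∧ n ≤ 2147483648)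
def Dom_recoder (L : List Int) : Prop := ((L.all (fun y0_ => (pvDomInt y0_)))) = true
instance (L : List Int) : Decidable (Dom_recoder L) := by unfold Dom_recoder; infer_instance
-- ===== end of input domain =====

-- One-line summary: B replaces A's per-character est_ascii branch by build-then-ASCII-'replace' recoding; return values proved equal on Pre_ (codes chr accepts).
-- Python one-character strings are modeled by their codepoint (an Int), since a Lean Char cannot
-- hold surrogate codepoints that Python's chr produces; on codepoints est_ascii's per-character
-- test 'ord(ch) < 0 or ord(ch) > 127' is exactly the test below.

-- ===== PORT A =====
-- est_ascii(ch): loop over the characters (here: codepoints) of ch, early False on a non-ASCII one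
def estAscii : List Int → Bool
  | [] => true
  | c :: t => if c < 0 ∨ 127 < c then false else estAscii t

-- the for-loop of recoder with its string accumulator res
def recoderLoop : List Int → String → String
  | [], res => res
  | c :: t, res =>
      if estAscii [c] = true then
        -- res += chr(L[i]); on this branch the code is ASCII so Char.ofNat is exact chr
        recoderLoop t (res ++ String.singleton (Char.ofNat c.toNat))
      else
        recoderLoop t (res ++ "?")

def recoder (L : List Int) : String := recoderLoop L ""

-- ===== PORT B =====
-- s = ''.join(chr(c) for c in L): the joined string is modeled by its codepoint list, i.e. L itself;
-- s.encode('ascii','replace').decode('ascii'): each code ≤ 127 becomes its character, all others '?'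
def recoder_alt (L : List Int) : String :=
  String.ofList (L.map (fun c => if 0 ≤ c ∧ c ≤ 127 then Char.ofNat c.toNat else '?'))

-- ===== PRECONDITION & SPEC =====
-- Pre_ excludes exactly the inputs where chr raises ValueError (code < 0 or ≥ 0x110000) in both A and B.
def Pre_recoder (L : List Int) : Prop := ∀ c ∈ L, 0 ≤ c ∧ c < 1114112
instance (L : List Int) : Decidable (Pre_recoder L) := by unfold Pre_recoder; infer_instance
def pvWitness_recoder : List Int := [72, 233, 10, 55296]

def Spec_recoder (L : List Int) (out : String) : Prop := out = recoder_alt L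
instance (L : List Int) (out : String) : Decidable (Spec_recoder L out) := by unfold Spec_recoder; infer_instance

-- ===== CLAIM (what is proved, stated in full; the proofs are below) =====
def Claim_equal_recoder : Prop := ∀ (L : List Int), Dom_recoder L → Pre_recoder L → Spec_recoder L (recoder L)

-- ===== LEMMAS AND PROOFS =====
lemma recoderLoop_toList (L : List Int) : ∀ res : String,
    (recoderLoop L res).toList = res.toList ++ L.map (fun c => if 0 ≤ c ∧ c ≤ 127 then Char.ofNat c.toNat else '?') := by
  induction L with
  | nil => intro res; simp [recoderLoop]
  | cons c t ih =>
    intro res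
    by_cases h : 0 ≤ c ∧ c ≤ 127
    · have hb : estAscii [c] = true := by simp [estAscii]; omega
      simp [recoderLoop, hb, ih, h]
    · have hb : estAscii [c] = false := by simp [estAscii]; omega
      simp [recoderLoop, hb, ih, h]

-- ===== VERDICT (by name: the statement is the Claim_ definition above) =====
theorem recoder_spec : Claim_equal_recoder := by
  intro L _ _
  unfold Spec_recoder recoder recoder_alt
  apply String.toList_injective
  simpa using recoderLoop_toList L ""
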